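-- pv_equiv track=rewrite | github.com/starcraft-gosu/backjoon | 1043_lying_bigbang.py | lie
-- ===== SOURCE A (Python) =====
-- def lie(parties, truth, M):
--     truth = set(truth)
--
--     # truth를 업데이트하며 truth와 교집합인 파티를 제외
--     while True:
--         start = len(parties)
--         for party in parties:
--             if not truth.isdisjoint(party):
--                 # party에서 truth의 여집합만 set로
--                 truth.update(party-truth)   # set는 빼기가 된다 list는 안되고
--                 parties.remove(party)
--         end = len(parties)
--
--         # parties의 업뎃이 없을때 종료
--         if start == end:
--             break
--     return len(parties)
-- ===== SOURCE B (Python) =====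
-- def lie(parties, truth, M):
--     # Build a person -> party-indices index once, flood-fill from the truth-knowers
--     # with an explicit stack (each party absorbed at most once via `done`), then
--     # count the parties the flood never reached.
--     # (Return-value equivalent to A; A also mutates `parties` in place, B does not.)
--     adj = {}
--     for i, party in enumerate(parties):
--         for p in party:
--             adj.setdefault(p, []).append(i)
--     seen = set(truth)
--     stack = list(truth)
--     done = set()
--     while stack:
--         x = stack.pop()
--         for i in adj.get(x, []):
--             if i not in done:
--                 done.add(i)
--                 for q in parties[i]:
--                     if q not in seen:
--                         seen.add(q)
--                         stack.append(q)
--     return sum(1 for party in parties if seen.isdisjoint(party))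
-- ===== Notes on version B (the rewrite author's own statement) =====
-- stated objective: alternative
-- what changed: A repeatedly rescans the party list, removing parties that touch the growing truth set until a pass removes nothing; B builds a person-to-parties index once and flood-fills the connected people with an explicit stack (each party absorbed at most once), then counts the untouched parties in one final pass.
import Mathlib
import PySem

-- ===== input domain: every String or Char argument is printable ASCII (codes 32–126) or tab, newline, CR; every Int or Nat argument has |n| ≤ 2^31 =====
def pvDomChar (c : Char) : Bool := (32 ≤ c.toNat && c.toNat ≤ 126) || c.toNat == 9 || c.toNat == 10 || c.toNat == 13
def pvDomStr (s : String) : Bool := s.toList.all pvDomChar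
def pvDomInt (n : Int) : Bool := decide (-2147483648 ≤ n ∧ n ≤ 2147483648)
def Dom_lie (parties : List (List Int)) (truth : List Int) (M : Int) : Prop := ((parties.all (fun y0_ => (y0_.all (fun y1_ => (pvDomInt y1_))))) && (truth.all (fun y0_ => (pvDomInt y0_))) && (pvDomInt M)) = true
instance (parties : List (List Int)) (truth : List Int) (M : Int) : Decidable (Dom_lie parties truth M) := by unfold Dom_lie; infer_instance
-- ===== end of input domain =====

-- B replaces A's rescan-and-remove fixpoint over the party list by a person→parties
-- index plus an explicit-stack flood fill from the truth-knowers (alternative algorithm).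
-- A mutates `parties` in place (list.remove); B does not: the equivalence proved here is
-- about the RETURN value only.

-- ===== PORT A =====
-- parties.remove(party): Python list.remove compares the stored SETS with ==,
-- i.e. removes the first entry that is set-equal to `party`.
def aRemove : List (List Int) → List Int → List (List Int)
  | [], _ => []
  | h :: t, v => if PySem.Set.equal h v then t else h :: aRemove t v

theorem aRemove_length_le (L : List (List Int)) (v : List Int) :
    (aRemove L v).length ≤ L.length := by
  induction L with
  | nil => simp [aRemove]
  | cons h t ih => by_cases hc : PySem.Set.equal h v <;> simp [aRemove, hc] <;> omega

-- one 'for party in parties' pass: CPython iterates by index over the mutating list,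
-- so after a removal the element that slid into the current slot is skipped — the
-- index i advances by one regardless, exactly as here.
def aPass (truthS : PySem.Set Int) (L : List (List Int)) (i : Nat) :
    PySem.Set Int × List (List Int) :=
  if h : i < L.length then
    if !(PySem.Set.isdisjoint truthS L[i]) then
      aPass (PySem.Set.update truthS (PySem.Set.diff L[i] truthS)) (aRemove L L[i]) (i + 1)
    else aPass truthS L (i + 1)
  else (truthS, L)
termination_by L.length - i
decreasing_by
  · have := aRemove_length_le L L[i]; omega
  · omega

-- 'while True': each pass that does not break removes at least one party, so
-- parties.length + 1 passes always suffice (the fuel-0 branch is unreachable).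
def aLoop : Nat → PySem.Set Int → List (List Int) → Int
  | 0, _, L => (L.length : Int)
  | f + 1, truthS, L =>
      let r := aPass truthS L 0
      if L.length = r.2.length then (r.2.length : Int) else aLoop f r.1 r.2

def lie (parties : List (List Int)) (truth : List Int) (M : Int) : Int :=
  aLoop (parties.length + 1) (PySem.Set.ofList truth) parties

-- ===== PORT B =====
-- adj: person -> indices of the parties containing them (setdefault(p, []).append(i))
def bAdj (parties : List (List Int)) : PySem.Dict Int (List Int) :=
  (PySem.List.enumerate parties 0).foldl
    (fun adj ip => ip.2.foldl (fun adj p => adj.modify p [] (fun l => l ++ [ip.1])) adj)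
    PySem.Dict.empty

-- absorbing one party index i: 'if i not in done: done.add(i); for q in parties[i]: …'
def bAbsorb (parties : List (List Int)) (s : PySem.Set Int × List Int × PySem.Set Int)
    (i : Int) : PySem.Set Int × List Int × PySem.Set Int :=
  if PySem.Set.contains s.2.2 i then s
  else
    let t := (PySem.List.pyGetD parties i []).foldl
      (fun t q => if PySem.Set.contains t.1 q then t
                  else (PySem.Set.add t.1 q, t.2 ++ [q])) (s.1, s.2.1)
    (t.1, t.2, PySem.Set.add s.2.2 i)

-- 'while stack: x = stack.pop(); for i in adj.get(x, []): …' — pop takes the LAST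
-- element; the fuel passed below strictly dominates the loop's potential, so the
-- fuel-0 branch is unreachable.
def bVisit (parties : List (List Int)) (adj : PySem.Dict Int (List Int)) :
    Nat → PySem.Set Int → List Int → PySem.Set Int → PySem.Set Int
  | 0, seen, _, _ => seen
  | fuel + 1, seen, stack, done =>
      if hs : stack = [] then seen
      else
        let x := stack.getLast hs
        let r := (adj.getD x []).foldl (bAbsorb parties) (seen, stack.dropLast, done)
        bVisit parties adj fuel r.1 r.2.1 r.2.2

def lie_alt (parties : List (List Int)) (truth : List Int) (M : Int) : Int :=
  let adj := bAdj parties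
  let seen := bVisit parties adj
    (truth.length + 2 * (truth.length + parties.flatten.length) + 1)
    (PySem.Set.ofList truth) truth PySem.Set.empty
  parties.foldl (fun c party => if PySem.Set.isdisjoint seen party then c + 1 else c) 0

-- ===== PRECONDITION & SPEC =====
def Spec_lie (parties : List (List Int)) (truth : List Int) (M : Int) (out : Int) : Prop := out = lie_alt parties truth M
instance (parties : List (List Int)) (truth : List Int) (M : Int) (out : Int) : Decidable (Spec_lie parties truth M out) := by unfold Spec_lie; infer_instance

-- ===== CLAIM (what is proved, stated in full; the proofs are below) =====
def Claim_equal_lie : Prop := ∀ (parties : List (List Int)) (truth : List Int) (M : Int), Dom_lie parties truth M → Spec_lie parties truth M (lie parties truth M)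

-- ===== LEMMAS AND PROOFS =====

-- S contains the truth-knowers and absorbs every party it touches
def Closed (parties : List (List Int)) (truth : List Int) (S : Int → Prop) : Prop :=
  (∀ x ∈ truth, S x) ∧ ∀ party ∈ parties, ∀ x ∈ party, S x → ∀ y ∈ party, S y

-- x is transitively connected to a truth-knower (the least Closed set)
def Conn (parties : List (List Int)) (truth : List Int) (x : Int) : Prop :=
  ∀ S, Closed parties truth S → S x

theorem closed_conn (parties : List (List Int)) (truth : List Int) :
    Closed parties truth (Conn parties truth) := by
  constructor
  · intro x hx S hS; exact hS.1 x hx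
  · intro party hpa x hx hcx y hy S hS
    exact hS.2 party hpa x hx (hcx S hS) y hy

-- ---------- A-side ----------

-- invariant of A's loop: T is the current truth set, L the remaining parties,
-- R the removed ones
def InvA (parties : List (List Int)) (truth : List Int)
    (T : PySem.Set Int) (L R : List (List Int)) : Prop :=
  (L ++ R).Perm parties ∧
  (∀ x ∈ truth, x ∈ T) ∧
  (∀ x ∈ T, Conn parties truth x) ∧
  (∀ v ∈ R, (∃ x ∈ v, x ∈ T) ∧ (∀ y ∈ v, y ∈ T))


theorem aRemove_perm (L : List (List Int)) (v : List Int)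
    (hv : ∃ w ∈ L, PySem.Set.equal w v = true) :
    ∃ w, PySem.Set.equal w v = true ∧ L.Perm (w :: aRemove L v) := by
  induction L with
  | nil => simp at hv
  | cons h t ih =>
      by_cases hc : PySem.Set.equal h v = true
      · exact ⟨h, hc, by simp [aRemove, hc]⟩
      · obtain ⟨w, hwmem, hwe⟩ := hv
        rcases List.mem_cons.mp hwmem with hw | hw
        · subst hw; exact absurd hwe hc
        · obtain ⟨u, hue, hperm⟩ := ih ⟨w, hw, hwe⟩
          refine ⟨u, hue, ?_⟩
          simp only [aRemove, hc]
          exact (hperm.cons h).trans (List.Perm.swap u h _)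

theorem aRemove_len (L : List (List Int)) (v : List Int)
    (hv : ∃ w ∈ L, PySem.Set.equal w v = true) :
    (aRemove L v).length + 1 = L.length := by
  obtain ⟨w, _, hperm⟩ := aRemove_perm L v hv
  simpa using hperm.length_eq.symm

theorem aPass_len_le (T : PySem.Set Int) (L : List (List Int)) (i : Nat) :
    (aPass T L i).2.length ≤ L.length := by
  fun_induction aPass with
  | case1 T L i h hd ih =>
      have := aRemove_length_le L L[i]
      omega
  | case2 T L i h hd ih => exact ih
  | case3 => simp

theorem aPass_fix (T : PySem.Set Int) (L : List (List Int)) (i : Nat)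
    (h : (aPass T L i).2.length = L.length) :
    aPass T L i = (T, L) ∧
      ∀ j (hj : j < L.length), i ≤ j → PySem.Set.isdisjoint T L[j] = true := by
  fun_induction aPass with
  | case1 T L i hlt hd ih =>
      exfalso
      have h1 := aPass_len_le (PySem.Set.update T (PySem.Set.diff L[i] T)) (aRemove L L[i]) (i+1)
      have h2 := aRemove_len L L[i] ⟨L[i], by simp, by
        exact (PySem.Set.equal_iff _ _).2 (fun x => Iff.rfl)⟩
      omega
  | case2 T L i hlt hd ih =>
      obtain ⟨he, hall⟩ := ih h
      refine ⟨he, fun j hj hij => ?_⟩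
      rcases Nat.eq_or_lt_of_le hij with rfl | hlt'
      · simpa using hd
      · exact hall j hj hlt'
  | case3 T L i hge =>
      exact ⟨rfl, fun j hj hij => absurd (Nat.lt_of_le_of_lt hij hj) hge⟩

theorem aPass_inv (parties : List (List Int)) (truth : List Int)
    (T : PySem.Set Int) (L R : List (List Int)) (i : Nat)
    (hInv : InvA parties truth T L R) :
    ∃ R', InvA parties truth (aPass T L i).1 (aPass T L i).2 R' := by
  fun_induction aPass generalizing R with
  | case1 T L i hlt hd ih =>
      obtain ⟨hperm, htr, hconn, hrem⟩ := hInv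
      -- the removed element w is set-equal to L[i]
      obtain ⟨w, hwe, hwperm⟩ := aRemove_perm L L[i]
        ⟨L[i], by simp, (PySem.Set.equal_iff _ _).2 (fun x => Iff.rfl)⟩
      have hwmem : ∀ x, x ∈ w ↔ x ∈ L[i] := (PySem.Set.equal_iff _ _).1 hwe
      -- some member of T lies in L[i]
      have hx0 : ∃ x ∈ T, x ∈ L[i] := by
        by_contra hno
        simp only [not_exists, not_and] at hno  -- ∀ x ∈ T, x ∉ L[i]
        have : PySem.Set.isdisjoint T L[i] = true :=
          (PySem.Set.isdisjoint_iff _ _).2 hno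
        simp [this] at hd
      obtain ⟨x0, hx0T, hx0p⟩ := hx0
      -- membership in the updated truth set
      have hmemT' : ∀ y, y ∈ PySem.Set.update T (PySem.Set.diff L[i] T) ↔ y ∈ T ∨ y ∈ L[i] := by
        intro y
        rw [PySem.Set.mem_update]
        constructor
        · rintro (hy | hy)
          · exact Or.inl hy
          · exact Or.inr ((PySem.Set.mem_diff _ _ _).1 hy).1
        · rintro (hy | hy)
          · exact Or.inl hy
          · by_cases hyT : y ∈ T
            · exact Or.inl hyT
            · exact Or.inr ((PySem.Set.mem_diff _ _ _).2 ⟨hy, hyT⟩)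
      have hLiConn : ∀ y ∈ L[i], Conn parties truth y := by
        intro y hy
        exact (closed_conn parties truth).2 L[i]
          (hperm.mem_iff.1 (by simp)) x0 hx0p (hconn x0 hx0T) y hy
      refine ih (w :: R) ⟨(List.perm_middle (a := w) (l₁ := aRemove L L[i]) (l₂ := R)).trans ((hwperm.symm.append_right R).trans hperm), ?_, ?_, ?_⟩
      · intro x hx; exact (hmemT' x).2 (Or.inl (htr x hx))
      · intro x hx
        rcases (hmemT' x).1 hx with hx | hx
        · exact hconn x hx
        · exact hLiConn x hx
      · intro v hv
        rcases List.mem_cons.mp hv with rfl | hv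
        · exact ⟨⟨x0, (hwmem x0).2 hx0p, (hmemT' x0).2 (Or.inl hx0T)⟩,
            fun y hy => (hmemT' y).2 (Or.inr ((hwmem y).1 hy))⟩
        · obtain ⟨⟨x, hxv, hxT⟩, hall⟩ := hrem v hv
          exact ⟨⟨x, hxv, (hmemT' x).2 (Or.inl hxT)⟩,
            fun y hy => (hmemT' y).2 (Or.inl (hall y hy))⟩
  | case2 T L i hlt hd ih => exact ih R hInv
  | case3 T L i hge => exact ⟨R, hInv⟩

theorem aLoop_spec (parties : List (List Int)) (truth : List Int) :
    ∀ (f : Nat) (T : PySem.Set Int) (L R : List (List Int)),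
      L.length < f → InvA parties truth T L R →
      ∃ T' L' R', aLoop f T L = (L'.length : Int) ∧ InvA parties truth T' L' R' ∧
        ∀ v ∈ L', PySem.Set.isdisjoint T' v = true := by
  intro f
  induction f with
  | zero => intro T L R h; omega
  | succ f ih =>
      intro T L R hf hInv
      by_cases hb : L.length = (aPass T L 0).2.length
      · obtain ⟨heq, hall⟩ := aPass_fix T L 0 hb.symm
        refine ⟨T, L, R, ?_, hInv, ?_⟩
        · simp [aLoop, heq]
        · intro v hv
          obtain ⟨j, hj, rfl⟩ := List.mem_iff_getElem.1 hv
          exact hall j hj (Nat.zero_le j)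
      · obtain ⟨R', hInv'⟩ := aPass_inv parties truth T L R 0 hInv
        have hlen : (aPass T L 0).2.length < L.length :=
          Nat.lt_of_le_of_ne (aPass_len_le T L 0) (fun h => hb h.symm)
        obtain ⟨T', L', R'', ha, hInv'', hall⟩ :=
          ih (aPass T L 0).1 (aPass T L 0).2 R' (by omega) hInv'
        refine ⟨T', L', R'', ?_, hInv'', hall⟩
        simp only [aLoop, if_neg hb]
        exact ha

theorem lie_char (parties : List (List Int)) (truth : List Int) (M : Int) :
    ∃ T : PySem.Set Int,
      lie parties truth M = (parties.countP (fun v => PySem.Set.isdisjoint T v) : Int) ∧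
      ∀ x, x ∈ T ↔ Conn parties truth x := by
  have hInv0 : InvA parties truth (PySem.Set.ofList truth) parties [] := by
    refine ⟨by simp, ?_, ?_, by simp⟩
    · intro x hx; exact (PySem.Set.mem_ofList _ _).2 hx
    · intro x hx S hS
      exact hS.1 x ((PySem.Set.mem_ofList _ _).1 hx)
  obtain ⟨T', L', R', ha, ⟨hperm, htr, hconn, hrem⟩, hall⟩ :=
    aLoop_spec parties truth (parties.length + 1) (PySem.Set.ofList truth) parties []
      (by omega) hInv0
  refine ⟨T', ?_, ?_⟩
  · unfold lie
    rw [ha]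
    congr 1
    -- countP over parties = countP over L' ++ R' = |L'|
    rw [← hperm.countP_eq, List.countP_append]
    have h1 : L'.countP (fun v => PySem.Set.isdisjoint T' v) = L'.length :=
      List.countP_eq_length.2 (fun v hv => hall v hv)
    have h2 : R'.countP (fun v => PySem.Set.isdisjoint T' v) = 0 := by
      refine List.countP_eq_zero.2 (fun v hv => ?_)
      obtain ⟨⟨x, hxv, hxT⟩, _⟩ := hrem v hv
      intro hdis
      exact ((PySem.Set.isdisjoint_iff _ _).1 hdis x hxT) hxv
    omega
  · intro x
    constructor
    · exact hconn x
    · intro hc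
      -- membership in T' is a Closed set
      refine hc (fun y => y ∈ T') ⟨htr, ?_⟩
      intro party hpa y hy hyT z hz
      have hmem : party ∈ L' ++ R' := hperm.mem_iff.2 hpa
      rcases List.mem_append.1 hmem with hL | hR
      · exact absurd hyT ((PySem.Set.isdisjoint_iff _ _).1 (hall party hL) y · hy)
      · exact (hrem party hR).2 z hz

-- ---------- B-side ----------

theorem nodup_subset_length (l l' : List Int) (h : l.Nodup) (hs : l ⊆ l') :
    l.length ≤ l'.length := by
  calc l.length = l.toFinset.card := (List.toFinset_card_of_nodup h).symm
  _ ≤ l'.toFinset.card := Finset.card_le_card (by intro x hx; simp at *; exact hs (by simpa using hx))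
  _ ≤ l'.length := l'.toFinset_card_le

def Univ (parties : List (List Int)) (truth : List Int) : PySem.Set Int :=
  PySem.Set.ofList (truth ++ parties.flatten)

theorem bAdj_mem (parties : List (List Int)) (x i : Int) :
    i ∈ (bAdj parties).getD x [] ↔
      ∃ (k : Nat) (h : k < parties.length), i = (k : Int) ∧ x ∈ parties[k] := by
  have hflat : bAdj parties =
      ((PySem.List.enumerate parties 0).flatMap (fun ip => ip.2.map (fun p => (p, ip.1)))).foldl
        (fun d pr => d.modify pr.1 [] (fun l => l ++ [pr.2])) PySem.Dict.empty := by
    unfold bAdj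
    rw [List.foldl_flatMap]
    simp only [List.foldl_map]
  rw [hflat, PySem.Dict.getD_foldl_modify_append, PySem.Dict.getD_empty]
  simp only [List.nil_append, List.mem_map, List.mem_filter, List.mem_flatMap,
    PySem.List.mem_enumerate_iff]
  constructor
  · rintro ⟨a, ⟨⟨a1, ⟨k, hk, rfl⟩, ⟨p2, hp2, rfl⟩⟩, hbeq⟩, hsnd⟩
    have hpx : p2 = x := by simpa using hbeq
    subst hpx
    exact ⟨k, hk, by simpa using hsnd.symm, hp2⟩
  · rintro ⟨k, hk, rfl, hx⟩
    exact ⟨(x, (0 : Int) + (k : Int)), ⟨⟨((0:Int) + (k:Int), parties[k]), ⟨k, hk, rfl⟩,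
      ⟨x, hx, rfl⟩⟩, by simp⟩, by simp⟩

theorem foldl_count_int (p : List Int → Bool) (l : List (List Int)) :
    ∀ c : Int, l.foldl (fun c party => if p party then c + 1 else c) c = c + l.countP p := by
  induction l with
  | nil => simp
  | cons h t ih =>
      intro c
      by_cases hp : p h <;> simp [hp, ih] <;> ring

theorem countP_isdisjoint_congr (parties : List (List Int)) (T S : PySem.Set Int)
    (h : ∀ x, x ∈ T ↔ x ∈ S) :
    parties.countP (fun v => PySem.Set.isdisjoint T v)
      = parties.countP (fun v => PySem.Set.isdisjoint S v) := by
  refine List.countP_congr (fun v _ => ?_)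
  rw [PySem.Set.isdisjoint_iff, PySem.Set.isdisjoint_iff]
  constructor
  · intro hd x hx; exact hd x ((h x).2 hx)
  · intro hd x hx; exact hd x ((h x).1 hx)

-- one inner 'for q in parties[i]' loop
theorem bInner_spec (party : List Int) :
    ∀ s : PySem.Set Int × List Int,
      (∀ y, y ∈ (party.foldl (fun s q => if PySem.Set.contains s.1 q then s
          else (PySem.Set.add s.1 q, s.2 ++ [q])) s).1 ↔ y ∈ s.1 ∨ y ∈ party) ∧
      (∀ y ∈ (party.foldl (fun s q => if PySem.Set.contains s.1 q then s
          else (PySem.Set.add s.1 q, s.2 ++ [q])) s).2, y ∈ s.2 ∨ y ∈ party) ∧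
      (∀ y ∈ s.2, y ∈ (party.foldl (fun s q => if PySem.Set.contains s.1 q then s
          else (PySem.Set.add s.1 q, s.2 ++ [q])) s).2) ∧
      (∀ y ∈ (party.foldl (fun s q => if PySem.Set.contains s.1 q then s
          else (PySem.Set.add s.1 q, s.2 ++ [q])) s).1, y ∈ s.1 ∨
        y ∈ (party.foldl (fun s q => if PySem.Set.contains s.1 q then s
          else (PySem.Set.add s.1 q, s.2 ++ [q])) s).2) ∧
      (s.1.Nodup → (party.foldl (fun s q => if PySem.Set.contains s.1 q then s
          else (PySem.Set.add s.1 q, s.2 ++ [q])) s).1.Nodup) ∧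
      ((party.foldl (fun s q => if PySem.Set.contains s.1 q then s
          else (PySem.Set.add s.1 q, s.2 ++ [q])) s).2.length + s.1.length
        = s.2.length + (party.foldl (fun s q => if PySem.Set.contains s.1 q then s
          else (PySem.Set.add s.1 q, s.2 ++ [q])) s).1.length) := by
  induction party with
  | nil =>
      intro s
      exact ⟨by simp, by simp, by simp, fun y hy => Or.inl hy, id, by simp⟩
  | cons q rest ih =>
      intro s
      simp only [List.foldl_cons]
      by_cases hc : PySem.Set.contains s.1 q = true
      · have hq : q ∈ s.1 := (PySem.Set.contains_iff _ _).1 hc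
        obtain ⟨h1, h2, h3, h4, h5, h6⟩ := ih s
        rw [if_pos hc]
        refine ⟨?_, ?_, h3, h4, h5, h6⟩
        · intro y
          rw [h1 y]
          constructor
          · rintro (hy | hy)
            · exact Or.inl hy
            · exact Or.inr (List.mem_cons_of_mem q hy)
          · rintro (hy | hy)
            · exact Or.inl hy
            · rcases List.mem_cons.1 hy with rfl | hy
              · exact Or.inl hq
              · exact Or.inr hy
        · intro y hy
          rcases h2 y hy with hy | hy
          · exact Or.inl hy
          · exact Or.inr (List.mem_cons_of_mem q hy)
      · have hq : q ∉ s.1 := fun h => hc ((PySem.Set.contains_iff _ _).2 h)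
        rw [if_neg hc]
        obtain ⟨h1, h2, h3, h4, h5, h6⟩ := ih (s.1.add q, s.2 ++ [q])
        have hadd : ∀ y, y ∈ s.1.add q ↔ y ∈ s.1 ∨ y = q := fun y => PySem.Set.mem_add _ _ _
        refine ⟨?_, ?_, ?_, ?_, ?_, ?_⟩
        · intro y
          rw [h1 y]
          simp only [hadd y]
          constructor
          · rintro ((hy | rfl) | hy)
            · exact Or.inl hy
            · exact Or.inr (by simp)
            · exact Or.inr (List.mem_cons_of_mem q hy)
          · rintro (hy | hy)
            · exact Or.inl (Or.inl hy)
            · rcases List.mem_cons.1 hy with rfl | hy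
              · exact Or.inl (Or.inr rfl)
              · exact Or.inr hy
        · intro y hy
          rcases h2 y hy with hy | hy
          · rcases List.mem_append.1 hy with hy | hy
            · exact Or.inl hy
            · have hyq : y = q := List.mem_singleton.1 hy
              subst hyq; exact Or.inr (by simp)
          · exact Or.inr (List.mem_cons_of_mem q hy)
        · intro y hy
          exact h3 y (List.mem_append_left _ hy)
        · intro y hy
          rcases h4 y hy with hy | hy
          · rcases (hadd y).1 hy with hy | rfl
            · exact Or.inl hy
            · exact Or.inr (h3 y (by simp))
          · exact Or.inr hy
        · intro hnd
          exact h5 (PySem.Set.nodup_add s.1 q hnd)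
        · have hlen : (s.1.add q).length = s.1.length + 1 := by
            rw [PySem.Set.add_of_not_mem hq]; simp
          simp only [hlen, List.length_append, List.length_cons, List.length_nil] at h6 ⊢
          omega

-- party #k has been absorbed whenever its index is in done
def DoneInv (parties : List (List Int)) (done seen : PySem.Set Int) : Prop :=
  ∀ (k : Nat) (hk : k < parties.length), ((k : Int) ∈ done) → ∀ y ∈ parties[k], y ∈ seen

theorem pyGetD_idx (parties : List (List Int)) (k : Nat) (hk : k < parties.length) :
    PySem.List.pyGetD parties (k : Int) [] = parties[k] := by
  rw [PySem.List.pyGetD_natCast]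
  exact List.getD_eq_getElem parties [] hk

-- the 'for i in adj.get(x, [])' loop
theorem bMid_spec (parties : List (List Int)) (is : List Int)
    (hgood : ∀ i ∈ is, ∃ (k : Nat) (hk : k < parties.length),
      i = (k : Int) ∧ PySem.List.pyGetD parties i [] = parties[k]) :
    ∀ s : PySem.Set Int × List Int × PySem.Set Int, DoneInv parties s.2.2 s.1 →
      (∀ y ∈ (is.foldl (bAbsorb parties) s).1,
        y ∈ s.1 ∨ ∃ i ∈ is, y ∈ PySem.List.pyGetD parties i []) ∧
      (∀ y ∈ s.1, y ∈ (is.foldl (bAbsorb parties) s).1) ∧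
      (∀ y ∈ (is.foldl (bAbsorb parties) s).2.1,
        y ∈ s.2.1 ∨ ∃ i ∈ is, y ∈ PySem.List.pyGetD parties i []) ∧
      (∀ y ∈ s.2.1, y ∈ (is.foldl (bAbsorb parties) s).2.1) ∧
      (∀ y ∈ (is.foldl (bAbsorb parties) s).1,
        y ∈ s.1 ∨ y ∈ (is.foldl (bAbsorb parties) s).2.1) ∧
      (s.1.Nodup → (is.foldl (bAbsorb parties) s).1.Nodup) ∧
      ((is.foldl (bAbsorb parties) s).2.1.length + s.1.length
        = s.2.1.length + (is.foldl (bAbsorb parties) s).1.length) ∧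
      (∀ i ∈ is, ∀ y ∈ PySem.List.pyGetD parties i [],
        y ∈ (is.foldl (bAbsorb parties) s).1) ∧
      DoneInv parties (is.foldl (bAbsorb parties) s).2.2 (is.foldl (bAbsorb parties) s).1 := by
  induction is with
  | nil =>
      intro s hD
      exact ⟨fun y hy => Or.inl hy, fun y hy => hy, fun y hy => Or.inl hy, fun y hy => hy,
        fun y hy => Or.inl hy, id, by simp, by simp, hD⟩
  | cons i rest ih =>
      intro s hD
      obtain ⟨k0, hk0, hik, hPi⟩ := hgood i (by simp)
      have hgood' : ∀ j ∈ rest, ∃ (k : Nat) (hk : k < parties.length),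
          j = (k : Int) ∧ PySem.List.pyGetD parties j [] = parties[k] :=
        fun j hj => hgood j (List.mem_cons_of_mem i hj)
      simp only [List.foldl_cons]
      by_cases hc : PySem.Set.contains s.2.2 i = true
      · -- i already done: party #k0 is already inside seen
        have hstep : bAbsorb parties s i = s := by unfold bAbsorb; rw [if_pos hc]
        rw [hstep]
        obtain ⟨h1, h2, h3, h4, h5, h6, h7, h8, h9⟩ := ih hgood' s hD
        have hPis : ∀ y ∈ PySem.List.pyGetD parties i [], y ∈ s.1 := by
          rw [hPi]
          exact hD k0 hk0 (hik ▸ (PySem.Set.contains_iff _ _).1 hc)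
        refine ⟨?_, h2, ?_, h4, h5, h6, h7, ?_, h9⟩
        · intro y hy
          rcases h1 y hy with hy | ⟨j, hj, hy⟩
          · exact Or.inl hy
          · exact Or.inr ⟨j, List.mem_cons_of_mem i hj, hy⟩
        · intro y hy
          rcases h3 y hy with hy | ⟨j, hj, hy⟩
          · exact Or.inl hy
          · exact Or.inr ⟨j, List.mem_cons_of_mem i hj, hy⟩
        · intro j hj
          rcases List.mem_cons.1 hj with rfl | hj
          · exact fun y hy => h2 y (hPis y hy)
          · exact h8 j hj
      · -- i fresh: absorb party #k0
        obtain ⟨g1, g2, g3, g4, g5, g6⟩ :=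
          bInner_spec (PySem.List.pyGetD parties i []) (s.1, s.2.1)
        set t := (PySem.List.pyGetD parties i []).foldl
          (fun t q => if PySem.Set.contains t.1 q then t
                      else (PySem.Set.add t.1 q, t.2 ++ [q])) (s.1, s.2.1) with htdef
        have hstep : bAbsorb parties s i = (t.1, t.2, PySem.Set.add s.2.2 i) := by
          unfold bAbsorb; rw [if_neg hc]
        rw [hstep]
        have hD' : DoneInv parties (PySem.Set.add s.2.2 i) t.1 := by
          intro k hk hkin y hy
          rcases (PySem.Set.mem_add _ _ _).1 hkin with hkin | hkin
          · exact (g1 y).2 (Or.inl (hD k hk hkin y hy))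
          · have hkk : k = k0 := by
              rw [hik] at hkin
              exact_mod_cast hkin
            subst hkk
            exact (g1 y).2 (Or.inr (by rw [hPi]; exact hy))
        obtain ⟨h1, h2, h3, h4, h5, h6, h7, h8, h9⟩ :=
          ih hgood' (t.1, t.2, PySem.Set.add s.2.2 i) hD'
        refine ⟨?_, ?_, ?_, ?_, ?_, fun hnd => h6 (g5 hnd), by
            have hg6 : t.2.length + s.1.length = s.2.1.length + t.1.length := by
              simpa using g6
            have hh7 : (rest.foldl (bAbsorb parties) (t.1, t.2, PySem.Set.add s.2.2 i)).2.1.length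
                + t.1.length = t.2.length
                + (rest.foldl (bAbsorb parties) (t.1, t.2, PySem.Set.add s.2.2 i)).1.length := by
              simpa using h7
            omega, ?_, h9⟩
        · intro y hy
          rcases h1 y hy with hy | ⟨j, hj, hy⟩
          · rcases (g1 y).1 hy with hy | hy
            · exact Or.inl hy
            · exact Or.inr ⟨i, by simp, hy⟩
          · exact Or.inr ⟨j, List.mem_cons_of_mem i hj, hy⟩
        · intro y hy
          exact h2 y ((g1 y).2 (Or.inl hy))
        · intro y hy
          rcases h3 y hy with hy | ⟨j, hj, hy⟩
          · rcases g2 y hy with hy | hy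
            · exact Or.inl hy
            · exact Or.inr ⟨i, by simp, hy⟩
          · exact Or.inr ⟨j, List.mem_cons_of_mem i hj, hy⟩
        · intro y hy
          exact h4 y (g3 y hy)
        · intro y hy
          rcases h5 y hy with hy | hy
          · rcases g4 y hy with hy | hy
            · exact Or.inl hy
            · exact Or.inr (h4 y hy)
          · exact Or.inr hy
        · intro j hj
          rcases List.mem_cons.1 hj with rfl | hj
          · exact fun y hy => h2 y ((g1 y).2 (Or.inr hy))
          · exact h8 j hj

-- invariant of B's flood fill
def InvB (parties : List (List Int)) (truth : List Int)
    (seen : PySem.Set Int) (stack : List Int) (done : PySem.Set Int) : Prop :=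
  (∀ x ∈ truth, x ∈ seen) ∧
  (∀ x ∈ seen, Conn parties truth x) ∧
  (∀ x ∈ stack, x ∈ seen) ∧
  (∀ x ∈ seen, x ∈ stack ∨
    ∀ party ∈ parties, x ∈ party → ∀ y ∈ party, y ∈ seen) ∧
  seen.Nodup ∧
  (∀ x ∈ seen, x ∈ Univ parties truth) ∧
  DoneInv parties done seen

theorem bVisit_spec (parties : List (List Int)) (truth : List Int) :
    ∀ (f : Nat) (seen : PySem.Set Int) (stack : List Int) (done : PySem.Set Int),
      stack.length + 2 * ((Univ parties truth).length - seen.length) < f →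
      InvB parties truth seen stack done →
      ∃ seen', bVisit parties (bAdj parties) f seen stack done = seen' ∧
        (∀ x ∈ truth, x ∈ seen') ∧ (∀ x ∈ seen', Conn parties truth x) ∧
        (∀ party ∈ parties, ∀ x ∈ party, x ∈ seen' → ∀ y ∈ party, y ∈ seen') := by
  intro f
  induction f with
  | zero => intro seen stack done h; omega
  | succ f ih =>
      intro seen stack done hfuel hInv
      obtain ⟨htr, hconn, hstk, hproc, hnd, hU, hD⟩ := hInv
      by_cases hs : stack = []
      · refine ⟨seen, by simp [bVisit, hs], htr, hconn, ?_⟩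
        intro party hpa x hx hxs y hy
        rcases hproc x hxs with hx' | hx'
        · rw [hs] at hx'; simp at hx'
        · exact hx' party hpa hx y hy
      · set x := stack.getLast hs with hxdef
        have hxseen : x ∈ seen := hstk x (List.getLast_mem hs)
        have hxconn : Conn parties truth x := hconn x hxseen
        have hgood : ∀ i ∈ (bAdj parties).getD x [], ∃ (k : Nat) (hk : k < parties.length),
            i = (k : Int) ∧ PySem.List.pyGetD parties i [] = parties[k] := by
          intro i hi
          obtain ⟨k, hk, rfl, hxk⟩ := (bAdj_mem parties x i).1 hi
          exact ⟨k, hk, rfl, pyGetD_idx parties k hk⟩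
        obtain ⟨m1, m2, m3, m4, m5, m6, m7, m8, m9⟩ :=
          bMid_spec parties ((bAdj parties).getD x []) hgood (seen, stack.dropLast, done) hD
        set r := ((bAdj parties).getD x []).foldl (bAbsorb parties)
          (seen, stack.dropLast, done) with hrdef
        have hPiConn : ∀ i ∈ (bAdj parties).getD x [],
            ∀ y ∈ PySem.List.pyGetD parties i [], Conn parties truth y := by
          intro i hi y hy
          obtain ⟨k, hk, rfl, hxk⟩ := (bAdj_mem parties x i).1 hi
          rw [pyGetD_idx parties k hk] at hy
          exact (closed_conn parties truth).2 parties[k] (parties.getElem_mem hk)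
            x hxk hxconn y hy
        have hPiU : ∀ i ∈ (bAdj parties).getD x [],
            ∀ y ∈ PySem.List.pyGetD parties i [], y ∈ Univ parties truth := by
          intro i hi y hy
          obtain ⟨k, hk, rfl, _⟩ := (bAdj_mem parties x i).1 hi
          rw [pyGetD_idx parties k hk] at hy
          unfold Univ
          rw [PySem.Set.mem_ofList]
          exact List.mem_append_right _
            (List.mem_flatten.2 ⟨parties[k], parties.getElem_mem hk, hy⟩)
        have hstack_split : stack = stack.dropLast ++ [x] :=
          (List.dropLast_concat_getLast hs).symm
        have hInv' : InvB parties truth r.1 r.2.1 r.2.2 := by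
          refine ⟨fun z hz => m2 z (htr z hz), ?_, ?_, ?_, m6 hnd, ?_, m9⟩
          · intro z hz
            rcases m1 z hz with hz | ⟨i, hi, hz⟩
            · exact hconn z hz
            · exact hPiConn i hi z hz
          · intro z hz
            rcases m3 z hz with hz | ⟨i, hi, hz⟩
            · exact m2 z (hstk z (by rw [hstack_split]; exact List.mem_append_left _ hz))
            · exact m8 i hi z hz
          · intro z hz
            rcases m5 z hz with hz | hz
            · rcases hproc z hz with hz' | hz'
              · rw [hstack_split] at hz'
                rcases List.mem_append.1 hz' with hz' | hz'
                · exact Or.inl (m4 z hz')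
                · have hzx : z = x := List.mem_singleton.1 hz'
                  subst hzx
                  refine Or.inr ?_
                  intro party hpa hzp y hy
                  obtain ⟨k, hk, hpeq⟩ := List.mem_iff_getElem.1 hpa
                  have hik : ((k : Int)) ∈ (bAdj parties).getD x [] :=
                    (bAdj_mem parties x (k : Int)).2 ⟨k, hk, rfl, by rw [hpeq]; exact hzp⟩
                  refine m8 (k : Int) hik y ?_
                  rw [pyGetD_idx parties k hk, hpeq]
                  exact hy
              · exact Or.inr (fun party hpa hzp y hy => m2 y (hz' party hpa hzp y hy))
            · exact Or.inl hz
          · intro z hz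
            rcases m1 z hz with hz | ⟨i, hi, hz⟩
            · exact hU z hz
            · exact hPiU i hi z hz
        have hr1U : r.1.length ≤ (Univ parties truth).length :=
          nodup_subset_length r.1 (Univ parties truth) (m6 hnd) hInv'.2.2.2.2.2.1
        have hdl : stack.dropLast.length + 1 = stack.length := by
          rw [hstack_split]; simp
        have hm7 : r.2.1.length + seen.length = stack.dropLast.length + r.1.length := by
          simpa using m7
        have hsa : seen.length ≤ r.1.length :=
          nodup_subset_length seen r.1 hnd m2
        have hfuel' : r.2.1.length + 2 * ((Univ parties truth).length - r.1.length) < f := by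
          omega
        obtain ⟨seen', hv, p1, p2, p3⟩ := ih r.1 r.2.1 r.2.2 hfuel' hInv'
        refine ⟨seen', ?_, p1, p2, p3⟩
        rw [← hv]
        simp only [bVisit, dif_neg hs]
        rfl

theorem lie_alt_char (parties : List (List Int)) (truth : List Int) (M : Int) :
    ∃ S : PySem.Set Int,
      lie_alt parties truth M = (parties.countP (fun v => PySem.Set.isdisjoint S v) : Int) ∧
      ∀ x, x ∈ S ↔ Conn parties truth x := by
  have hInv0 : InvB parties truth (PySem.Set.ofList truth) truth PySem.Set.empty := by
    refine ⟨?_, ?_, ?_, ?_, PySem.Set.nodup_ofList truth, ?_, ?_⟩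
    · intro x hx; exact (PySem.Set.mem_ofList _ _).2 hx
    · intro x hx S hS; exact hS.1 x ((PySem.Set.mem_ofList _ _).1 hx)
    · intro x hx; exact (PySem.Set.mem_ofList _ _).2 hx
    · intro x hx; exact Or.inl ((PySem.Set.mem_ofList _ _).1 hx)
    · intro x hx
      unfold Univ
      rw [PySem.Set.mem_ofList]
      exact List.mem_append_left _ ((PySem.Set.mem_ofList _ _).1 hx)
    · intro k hk hkin; simp [PySem.Set.empty] at hkin
  have hUlen : (Univ parties truth).length ≤ truth.length + parties.flatten.length := by
    have := PySem.Set.length_ofList_le (truth ++ parties.flatten)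
    unfold Univ
    simpa using this
  have hfuel : truth.length + 2 * ((Univ parties truth).length -
      (PySem.Set.ofList truth).length) <
      truth.length + 2 * (truth.length + parties.flatten.length) + 1 := by
    omega
  obtain ⟨seen', hv, p1, p2, p3⟩ := bVisit_spec parties truth
    (truth.length + 2 * (truth.length + parties.flatten.length) + 1)
    (PySem.Set.ofList truth) truth PySem.Set.empty hfuel hInv0
  refine ⟨seen', ?_, ?_⟩
  · show (parties.foldl (fun c party => if PySem.Set.isdisjoint
        (bVisit parties (bAdj parties)
          (truth.length + 2 * (truth.length + parties.flatten.length) + 1)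
          (PySem.Set.ofList truth) truth PySem.Set.empty) party then c + 1 else c) 0 : Int) = _
    rw [hv, foldl_count_int (fun v => PySem.Set.isdisjoint seen' v) parties 0]
    simp
  · intro x
    constructor
    · intro hx
      exact p2 x hx
    · intro hc
      refine hc (fun y => y ∈ seen') ⟨p1, ?_⟩
      intro party hpa y hy hys z hz
      exact p3 party hpa y hy hys z hz

-- ===== VERDICT (by name: the statement is the Claim_ definition above) =====
theorem lie_spec : Claim_equal_lie := by
  intro parties truth M _
  unfold Spec_lie
  obtain ⟨T, hTa, hT⟩ := lie_char parties truth M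
  obtain ⟨S, hSa, hS⟩ := lie_alt_char parties truth M
  rw [hTa, hSa, countP_isdisjoint_congr parties T S
    (fun x => (hT x).trans (hS x).symm)]
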